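-- pv_equiv track=rewrite | github.com/Feldariia/Sequence-Alignment | main.py | alignments
-- ===== SOURCE A (Python) =====
-- from collections import deque
--
-- def alignments(x, y):
--     # Recursion method for alignment sequences
--     def alignment_recursion(x, y):
--
--         if len(x) == 0 and len(y) == 0:
--             yield deque()
--
--         # Appending sequences to search for a match
--         sequences = []
--         if len(x) > 0 and len(y) > 0:
--             sequences.append((x[0], x[1:], y[0], y[1:]))
--         if len(x) > 0:
--             sequences.append((x[0], x[1:], None, y))
--         if len(y) > 0:
--             sequences.append((None, x, y[0], y[1:]))
--
--         # Head: Front of Sequence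
--         # Tail: Back of Sequence
--         for head1, tail1, head2, tail2 in sequences:
--             for alignment in alignment_recursion(tail1, tail2):
--                 alignment.appendleft((head1, head2))
--                 yield alignment
--
--
--     #Return alignment recursion and append to list
--     alignments = alignment_recursion(range(len(x)), range(len(y)))
--     return map(list, alignments)
-- ===== SOURCE B (Python) =====
-- def alignments(x, y):
--     # Bottom-up DP: fill a table of suffix-pair alignment lists, rows from the
--     # bottom up and cells right-to-left, instead of A's top-down recursion.
--     n, m = len(x), len(y)
--     row = [[[]]]                      # row for x-suffix = [] ; cell j = alignments of ([], y[j:])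
--     for j in range(m - 1, -1, -1):
--         row.insert(0, [[(None, j)] + a for a in row[0]])
--     for i in range(n - 1, -1, -1):
--         new = [[[(i, None)] + a for a in row[m]]]     # cell (i, m)
--         for j in range(m - 1, -1, -1):
--             cell = ([[(i, j)] + a for a in row[j + 1]]
--                     + [[(i, None)] + a for a in row[j]]
--                     + [[(None, j)] + a for a in new[0]])
--             new.insert(0, cell)
--         row = new
--     return row[0]
-- ===== Notes on version B (the rewrite author's own statement) =====
-- stated objective: alternative
-- what changed: Replaces A's top-down generator recursion with deque/appendleft and a final map(list, ...) by a bottom-up dynamic-programming table over suffix pairs, filled row by row and right-to-left, preserving A's match/x-gap/y-gap order.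
import Mathlib
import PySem

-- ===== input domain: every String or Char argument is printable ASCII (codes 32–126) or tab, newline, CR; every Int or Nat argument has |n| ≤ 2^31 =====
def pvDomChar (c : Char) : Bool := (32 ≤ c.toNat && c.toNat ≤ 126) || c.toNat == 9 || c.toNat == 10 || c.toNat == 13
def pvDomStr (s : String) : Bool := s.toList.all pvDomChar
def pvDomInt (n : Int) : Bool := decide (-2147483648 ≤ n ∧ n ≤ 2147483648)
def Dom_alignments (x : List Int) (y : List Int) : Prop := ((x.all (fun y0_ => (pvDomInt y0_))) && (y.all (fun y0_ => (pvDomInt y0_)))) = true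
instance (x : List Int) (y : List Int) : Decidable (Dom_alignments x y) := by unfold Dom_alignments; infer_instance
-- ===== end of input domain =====

-- B replaces A's top-down deque/appendleft generator recursion (plus the final map(list, ...))
-- by a bottom-up dynamic-programming table over suffix pairs, keeping A's candidate order;
-- A returns a lazy iterator, B a list: the equivalence is about the sequence of yielded values.

-- ===== PORT A =====
-- A's inner alignment_recursion: yield the empty alignment when both are empty; then for each
-- candidate (match, x-gap, y-gap) in that order, recurse on the tails and prepend the heads.
def alignRecA : List Int → List Int → List (List (Option Int × Option Int))
  | [], [] => [[]]
  | [], b :: ys =>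
      (alignRecA [] ys).map (fun al => (none, some b) :: al)
  | a :: xs, [] =>
      (alignRecA xs []).map (fun al => (some a, none) :: al)
  | a :: xs, b :: ys =>
      (alignRecA xs ys).map (fun al => (some a, some b) :: al) ++
      (alignRecA xs (b :: ys)).map (fun al => (some a, none) :: al) ++
      (alignRecA (a :: xs) ys).map (fun al => (none, some b) :: al)
  termination_by x y => x.length + y.length
  decreasing_by all_goals (simp only [List.length_cons]; omega)

def alignments (x : List Int) (y : List Int) : List (List (Option Int × Option Int)) :=
  alignRecA ((List.range x.length).map Int.ofNat) ((List.range y.length).map Int.ofNat)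

-- ===== PORT B =====
-- B's first loop: the bottom table row (empty x-suffix), built from the right end; the
-- Python 'for j in range(m-1,-1,-1): row.insert(0, ...)' is this right-to-left recursion.
def dpBottomRow : List Int → List (List (List (Option Int × Option Int)))
  | [] => [[[]]]
  | j :: js =>
      let r := dpBottomRow js
      ((r.headD []).map (fun a => (none, some j) :: a)) :: r

-- B's inner loop: one new table row for x-index i from the row below (rb), cells right-to-left;
-- 'new[0]' is the head of the part of the row already built.
def dpBuildRow (i : Int) : List Int → List (List (List (Option Int × Option Int))) → List (List (List (Option Int × Option Int)))
  | [], rb => [(rb.headD []).map (fun a => ((some i : Option Int), (none : Option Int)) :: a)]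
  | j :: js, rb =>
      let r := dpBuildRow i js rb.tail
      (((rb.tail.headD []).map (fun a => (some i, some j) :: a)) ++
       ((rb.headD []).map (fun a => (some i, none) :: a)) ++
       ((r.headD []).map (fun a => (none, some j) :: a))) :: r

-- B's outer loop: rows from the bottom up.
def dpRows : List Int → List Int → List (List (List (Option Int × Option Int)))
  | [], ys => dpBottomRow ys
  | i :: is, ys => dpBuildRow i ys (dpRows is ys)

def alignments_alt (x : List Int) (y : List Int) : List (List (Option Int × Option Int)) :=
  (dpRows ((List.range x.length).map Int.ofNat) ((List.range y.length).map Int.ofNat)).headD []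

-- ===== PRECONDITION & SPEC =====
def Spec_alignments (x : List Int) (y : List Int) (out : List (List (Option Int × Option Int))) : Prop := out = alignments_alt x y
instance (x : List Int) (y : List Int) (out : List (List (Option Int × Option Int))) : Decidable (Spec_alignments x y out) := by unfold Spec_alignments; infer_instance

-- ===== CLAIM (what is proved, stated in full; the proofs are below) =====
def Claim_equal_alignments : Prop := ∀ (x : List Int) (y : List Int), Dom_alignments x y → Spec_alignments x y (alignments x y)

-- ===== LEMMAS AND PROOFS =====

-- The head of List.tails is the whole list.
theorem tails_head? {T : Type} (l : List T) : l.tails.head? = some l := by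
  cases l <;> simp

-- The bottom row is the row of A's results for the empty x-suffix against each y-suffix.
theorem dpBottomRow_eq (ys : List Int) :
    dpBottomRow ys = ys.tails.map (alignRecA []) := by
  induction ys with
  | nil => simp [dpBottomRow, alignRecA]
  | cons j js ih =>
      simp [dpBottomRow, ih, tails_head?, alignRecA]

-- Building a row on top of the row of A's results for is gives the row for i :: is.
theorem dpBuildRow_eq (i : Int) (is : List Int) (ys : List Int) :
    dpBuildRow i ys (ys.tails.map (alignRecA is)) = ys.tails.map (alignRecA (i :: is)) := by
  induction ys with
  | nil => simp [dpBuildRow, alignRecA]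
  | cons j js ih =>
      simp only [List.tails_cons, List.map_cons, dpBuildRow, List.tail_cons] at ih ⊢
      rw [ih]
      have : alignRecA (i :: is) (j :: js) =
          (alignRecA is js).map (fun al => (some i, some j) :: al) ++
          (alignRecA is (j :: js)).map (fun al => (some i, none) :: al) ++
          (alignRecA (i :: is) js).map (fun al => (none, some j) :: al) := by
        simp [alignRecA]
      cases js with
      | nil => simp [this]
      | cons j' js' => simp [this]

-- Every row of the table is the corresponding row of A's results.
theorem dpRows_eq (is ys : List Int) :
    dpRows is ys = ys.tails.map (alignRecA is) := by
  induction is with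
  | nil => simp [dpRows, dpBottomRow_eq]
  | cons i is ih => simp [dpRows, ih, dpBuildRow_eq]

-- ===== VERDICT (by name: the statement is the Claim_ definition above) =====
theorem alignments_spec : Claim_equal_alignments := by
  intro x y _
  unfold Spec_alignments alignments alignments_alt
  rw [dpRows_eq]
  cases h : (List.range y.length).map Int.ofNat with
  | nil => simp
  | cons t ts => simp
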